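-- pv_equiv track=rewrite | github.com/ngoubou/Data-Structures---Algorithms-Helsinki | week_9/oddlist.py | count
-- ===== SOURCE A (Python) =====
-- def count(n, x):
--     # Base case: If n is 1, there's only one possible list, which is [x]
--     if n == 1:
--         return 1
--     # Base case: If n is 2 and x is 1, there are two possible lists: [1, 2] and [2, 1]
--     elif n == 2 and x == 1:
--         return 2
--     # Base case: If n is 2 and x is not 1, there's only one possible list: [x, 1]
--     elif n == 2:
--         return 1
--     else:
--         # If x is the first element, the next element can be any number except x
--         if x == 1:
--             return count(n-1, x) + count(n-1, x+1)
--         # If x is the last element, the previous element can be any number except x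
--         elif x == n:
--             return count(n-1, x-1)
--         # For any other case, the next or previous element can be any number adjacent to x
--         else:
--             return count(n-1, x-1) + count(n-1, x+1)
-- ===== SOURCE B (Python) =====
-- def count(n, x):
--     # Bottom-up DP: row m holds count(m, y) for every y in [x-(n-m), x+(n-m)],
--     # starting from the all-ones row for m = 1 and shrinking by one on each side.
--     cur = [1] * (2 * n - 1)  # count(1, y) = 1 for y in [x-(n-1), x+(n-1)]
--     for m in range(2, n + 1):
--         lo = x - (n - m)  # smallest y needed at level m
--         nxt = []
--         for i in range(2 * (n - m) + 1):
--             y = lo + i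
--             if m == 2:
--                 nxt.append(2 if y == 1 else 1)
--             elif y == 1:
--                 nxt.append(cur[i + 1] + cur[i + 2])
--             elif y == m:
--                 nxt.append(cur[i])
--             else:
--                 nxt.append(cur[i] + cur[i + 2])
--         cur = nxt
--     return cur[0]
-- ===== Notes on version B (the rewrite author's own statement) =====
-- stated objective: faster
-- what changed: Replaces A's exponential top-down recursion with a bottom-up dynamic program that iterates levels m = 2..n over a shrinking row of the x-values reachable at each level.
import Mathlib
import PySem

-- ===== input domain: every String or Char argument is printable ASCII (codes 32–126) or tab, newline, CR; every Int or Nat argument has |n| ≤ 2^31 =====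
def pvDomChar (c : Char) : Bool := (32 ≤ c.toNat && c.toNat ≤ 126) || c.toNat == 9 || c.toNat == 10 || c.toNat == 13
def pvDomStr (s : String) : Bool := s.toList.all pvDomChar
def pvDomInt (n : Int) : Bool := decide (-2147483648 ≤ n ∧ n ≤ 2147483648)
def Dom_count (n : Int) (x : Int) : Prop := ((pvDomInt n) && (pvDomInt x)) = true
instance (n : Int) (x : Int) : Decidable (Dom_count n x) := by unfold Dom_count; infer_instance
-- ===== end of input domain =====

-- B replaces A's exponential top-down recursion by a bottom-up O(n^2) DP over
-- shrinking rows of adjacent x-values (same return value on every n ≥ 1).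

-- ===== PORT A =====
-- A recurses on n-1 down to the base cases n = 1 / n = 2; for n ≤ 0 the Python
-- recursion never terminates (excluded by Pre_count), so the n = 0 pattern below
-- is unreachable under the claim.
def countA : Nat → Int → Int
  | 0, _ => 0            -- unreachable under Pre_count (Python diverges for n ≤ 0)
  | 1, _ => 1
  | 2, x => if x = 1 then 2 else 1
  | (m+3), x =>
      if x = 1 then countA (m+2) x + countA (m+2) (x+1)
      else if x = (m : Int) + 3 then countA (m+2) (x-1)
      else countA (m+2) (x-1) + countA (m+2) (x+1)

def count (n : Int) (x : Int) : Int := countA n.toNat x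

-- ===== PORT B =====
-- Transliteration of Source B: row for level 1 is [1]*(2n-1); each pass over
-- m = 2..n rebuilds the row (list indexing is in range under Pre_count,
-- pyGetD's default 0 is never used there).
def count_alt (n : Int) (x : Int) : Int :=
  let cur : List Int := List.replicate (2*n - 1).toNat 1
  let cur := (PySem.List.pyRange 2 (n+1) 1).foldl (fun cur m =>
    let lo := x - (n - m)
    (PySem.List.pyRange 0 (2*(n - m) + 1) 1).foldl (fun nxt i =>
      let y := lo + i
      nxt ++ [ if m = 2 then (if y = 1 then 2 else 1)
               else if y = 1 then
                 PySem.List.pyGetD cur (i+1) 0 + PySem.List.pyGetD cur (i+2) 0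
               else if y = m then PySem.List.pyGetD cur i 0
               else PySem.List.pyGetD cur i 0 + PySem.List.pyGetD cur (i+2) 0 ]) []) cur
  PySem.List.pyGetD cur 0 0  -- cur[0]; nonempty under Pre_count

-- ===== PRECONDITION & SPEC =====
-- Pre_count excludes n ≤ 0, on which the Python A recurses forever (RecursionError).
def Pre_count (n : Int) (x : Int) : Prop := 1 ≤ n
instance (n : Int) (x : Int) : Decidable (Pre_count n x) := by unfold Pre_count; infer_instance
def pvWitness_count : Int × Int := (4, 2)

def Spec_count (n : Int) (x : Int) (out : Int) : Prop := out = count_alt n x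
instance (n : Int) (x : Int) (out : Int) : Decidable (Spec_count n x out) := by unfold Spec_count; infer_instance

-- ===== CLAIM (what is proved, stated in full; the proofs are below) =====
def Claim_equal_count : Prop := ∀ (n : Int) (x : Int), Dom_count n x → Pre_count n x → Spec_count n x (count n x)

-- ===== LEMMAS AND PROOFS =====

-- the row of values count(m, y) for y ranging over [x-d, x+d]
def pvRow (x : Int) (t : Nat) (d : Int) : List Int :=
  (PySem.List.pyRange 0 (2*d + 1) 1).map (fun i => countA t (x - d + i))

theorem countA_ge3 (t : Nat) (ht : 3 ≤ t) (y : Int) :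
    countA t y = if y = 1 then countA (t-1) y + countA (t-1) (y+1)
                 else if y = (t : Int) then countA (t-1) (y-1)
                 else countA (t-1) (y-1) + countA (t-1) (y+1) := by
  obtain ⟨k, rfl⟩ : ∃ k, t = k + 3 := ⟨t - 3, by omega⟩
  have hc : ((k + 3 : Nat) : Int) = (k : Int) + 3 := by push_cast; ring
  simp only [countA, hc]
  norm_num

theorem pvStep (x m d : Int) (hm : 2 ≤ m) (_hd : 0 ≤ d) :
    (PySem.List.pyRange 0 (2*d + 1) 1).foldl (fun nxt i =>
      nxt ++ [ if m = 2 then (if (x - d + i) = 1 then 2 else 1)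
               else if (x - d + i) = 1 then
                 PySem.List.pyGetD (pvRow x (m-1).toNat (d+1)) (i+1) 0
                   + PySem.List.pyGetD (pvRow x (m-1).toNat (d+1)) (i+2) 0
               else if (x - d + i) = m then PySem.List.pyGetD (pvRow x (m-1).toNat (d+1)) i 0
               else PySem.List.pyGetD (pvRow x (m-1).toNat (d+1)) i 0
                   + PySem.List.pyGetD (pvRow x (m-1).toNat (d+1)) (i+2) 0 ]) []
    = pvRow x m.toNat d := by
  rw [PySem.List.foldl_append_singleton_eq_map, List.nil_append, pvRow]
  apply List.map_congr_left
  intro i hi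
  rw [PySem.List.mem_pyRange_one] at hi
  have hrow : ∀ (j : Int), 0 ≤ j → j < 2*(d+1) + 1 →
      PySem.List.pyGetD ((PySem.List.pyRange 0 (2*(d+1) + 1) 1).map
          (fun i => countA (m-1).toNat (x - (d+1) + i))) j 0
        = countA (m-1).toNat (x - (d+1) + j) := by
    intro j h0 h1
    rw [PySem.List.pyGetD_map_pyRange_of_nonneg _ _ _ _ h0 h1]
  by_cases hm2 : m = 2
  · subst hm2
    have : (2:Int).toNat = 2 := rfl
    rw [this]
    simp [countA]
  · have hm3 : 3 ≤ m := by omega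
    have ht3 : 3 ≤ m.toNat := by omega
    rw [countA_ge3 m.toNat ht3]
    have htc : ((m.toNat : Int)) = m := by omega
    have htm1 : m.toNat - 1 = (m-1).toNat := by omega
    rw [htc, htm1, if_neg hm2]
    by_cases h1 : x - d + i = 1
    · rw [if_pos h1, if_pos h1, hrow (i+1) (by omega) (by omega),
        hrow (i+2) (by omega) (by omega)]
      have e1 : x - (d+1) + (i+1) = x - d + i := by ring
      have e2 : x - (d+1) + (i+2) = x - d + i + 1 := by ring
      rw [e1, e2]
    · rw [if_neg h1, if_neg h1]
      by_cases h2 : x - d + i = m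
      · rw [if_pos h2, if_pos h2, hrow i (by omega) (by omega)]
        have e1 : x - (d+1) + i = x - d + i - 1 := by ring
        rw [e1]
      · rw [if_neg h2, if_neg h2, hrow i (by omega) (by omega),
          hrow (i+2) (by omega) (by omega)]
        have e1 : x - (d+1) + i = x - d + i - 1 := by ring
        have e2 : x - (d+1) + (i+2) = x - d + i + 1 := by ring
        rw [e1, e2]

theorem pvOuter (x n : Int) (m : Int) (hm : 2 ≤ m) (hmn : m ≤ n + 1) :
    (PySem.List.pyRange m (n+1) 1).foldl (fun cur m =>
      let lo := x - (n - m)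
      (PySem.List.pyRange 0 (2*(n - m) + 1) 1).foldl (fun nxt i =>
        let y := lo + i
        nxt ++ [ if m = 2 then (if y = 1 then 2 else 1)
                 else if y = 1 then
                   PySem.List.pyGetD cur (i+1) 0 + PySem.List.pyGetD cur (i+2) 0
                 else if y = m then PySem.List.pyGetD cur i 0
                 else PySem.List.pyGetD cur i 0 + PySem.List.pyGetD cur (i+2) 0 ]) [])
      (pvRow x (m-1).toNat (n - m + 1))
    = pvRow x n.toNat 0 := by
  by_cases h : m = n + 1
  · subst h
    rw [PySem.List.pyRange_one_eq_nil (le_refl _)]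
    simp only [List.foldl_nil]
    congr 1
    · omega
    · ring
  · have hlt : m < n + 1 := by omega
    rw [PySem.List.pyRange_one_cons hlt, List.foldl_cons]
    have hstep := pvStep x m (n - m) hm (by omega)
    simp only []
    rw [show x - (n - m) = x - (n-m) from rfl]
    rw [hstep]
    have := pvOuter x n (m+1) (by omega) (by omega)
    have he : (m+1-1).toNat = m.toNat ∧ n - (m+1) + 1 = n - m := by omega
    rw [he.1, he.2] at this
    exact this
termination_by (n + 1 - m).toNat
decreasing_by omega

-- ===== VERDICT (by name: the statement is the Claim_ definition above) =====
theorem count_spec : Claim_equal_count := by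
  intro n x _ hn
  unfold Spec_count count count_alt
  have hn1 : (1:Int) ≤ n := hn
  have hinit : List.replicate (2*n - 1).toNat (1:Int) = pvRow x ((2:Int)-1).toNat (n - 2 + 1) := by
    rw [pvRow]
    have : ∀ i ∈ PySem.List.pyRange 0 (2*(n-2+1) + 1) 1,
        countA ((2:Int)-1).toNat (x - (n-2+1) + i) = 1 := by
      intro i _; rfl
    rw [List.map_congr_left this, List.map_const', PySem.List.length_pyRange_one]
    congr 1
    omega
  show countA n.toNat x = PySem.List.pyGetD
    ((PySem.List.pyRange 2 (n+1) 1).foldl (fun cur m =>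
      let lo := x - (n - m)
      (PySem.List.pyRange 0 (2*(n - m) + 1) 1).foldl (fun nxt i =>
        let y := lo + i
        nxt ++ [ if m = 2 then (if y = 1 then 2 else 1)
                 else if y = 1 then
                   PySem.List.pyGetD cur (i+1) 0 + PySem.List.pyGetD cur (i+2) 0
                 else if y = m then PySem.List.pyGetD cur i 0
                 else PySem.List.pyGetD cur i 0 + PySem.List.pyGetD cur (i+2) 0 ]) [])
      (List.replicate (2*n - 1).toNat 1)) 0 0
  rw [hinit, pvOuter x n 2 (le_refl _) (by omega)]
  rw [pvRow]
  have h1 : (2*(0:Int) + 1) = 1 := by ring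
  rw [h1, PySem.List.pyRange_one_cons (by norm_num),
    PySem.List.pyRange_one_eq_nil (by norm_num : (1:Int) ≤ 0 + 1)]
  simp [PySem.List.pyGetD]
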